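-- pv_equiv track=rewrite | github.com/rahalejr/rhale_projects | Dice Game (HOG)/hog.py | piggy_points
-- ===== SOURCE A (Python) =====
-- def piggy_points(score):
--     """Return the points scored from rolling 0 dice.
--
--     score:  The opponent's current score.
--     """
--     # BEGIN PROBLEM 2
--     squared = score**2
--     min_digit = 9
--
--     while squared > 9:
--         min_digit = min(min_digit, squared%10)
--         squared//=10
--
--     min_digit = min(min_digit, squared)
--     return min_digit+3
-- ===== SOURCE B (Python) =====
-- def piggy_points(score):
--     """Return the points scored from rolling 0 dice.
--
--     score:  The opponent's current score.
--     """
--     digits = set(str(score**2))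
--     for d in "0123456789":
--         if d in digits:
--             return int(d) + 3
-- ===== Notes on version B (the rewrite author's own statement) =====
-- stated objective: alternative
-- what changed: B never computes a running minimum over the square's digits: it builds the set of digit characters of score**2 once and then searches the fixed candidate list '0'..'9' in ascending order, returning the first candidate present in the set; A instead peels digits with %10 and //10 while folding min into a sentinel-9 accumulator.
import Mathlib
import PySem

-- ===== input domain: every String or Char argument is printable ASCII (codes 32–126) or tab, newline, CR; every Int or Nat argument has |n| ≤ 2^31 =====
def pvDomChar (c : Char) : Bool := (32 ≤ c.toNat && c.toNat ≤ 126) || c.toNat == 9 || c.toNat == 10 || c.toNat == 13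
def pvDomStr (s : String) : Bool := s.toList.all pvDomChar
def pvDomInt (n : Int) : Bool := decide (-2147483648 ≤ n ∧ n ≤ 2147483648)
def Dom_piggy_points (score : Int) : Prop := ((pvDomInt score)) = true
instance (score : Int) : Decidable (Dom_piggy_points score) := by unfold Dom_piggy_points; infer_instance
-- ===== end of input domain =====

-- B builds the set of digit characters of score**2 once and searches candidates '0'..'9'
-- ascending for the first one present, instead of A's %10 // 10 peeling loop folding min
-- into a sentinel-9 accumulator (objective: alternative; same cost).


-- ===== PORT A =====
-- the 'while squared > 9' loop, carrying (squared, min_digit)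
def pigLoop (squared min_digit : Int) : Int × Int :=
  if 9 < squared then
    pigLoop (PySem.Int.floordiv squared 10) (min min_digit (PySem.Int.mod squared 10))
  else (squared, min_digit)
termination_by squared.toNat
decreasing_by
  have h : PySem.Int.floordiv squared 10 = squared / 10 :=
    PySem.Int.floordiv_eq_ediv_of_pos (by omega)
  rw [h]; omega

def piggy_points (score : Int) : Int :=
  let squared := score ^ 2
  let p := pigLoop squared 9
  let min_digit := min p.2 p.1
  min_digit + 3

-- ===== PORT B =====
-- the 'for d in "0123456789"' loop with its early return int(d)+3
def findDigit (cands : List Char) (digits : PySem.Set Char) : Option Int :=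
  match cands with
  | [] => none
  | d :: rest =>
      if PySem.Set.contains digits d then some (((d.toNat : Int) - 48) + 3)
      else findDigit rest digits

def piggy_points_alt (score : Int) : Int :=
  let digits := PySem.Set.ofList (PySem.Int.toChars (score ^ 2))  -- set(str(score**2)) over its chars
  match findDigit "0123456789".toList digits with
  | some r => r
  | none => 0   -- unreachable: str(score**2) always contains some digit, Python falls off returning None

-- ===== PRECONDITION & SPEC =====
def Spec_piggy_points (score : Int) (out : Int) : Prop := out = piggy_points_alt score
instance (score : Int) (out : Int) : Decidable (Spec_piggy_points score out) := by unfold Spec_piggy_points; infer_instance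

-- ===== CLAIM (what is proved, stated in full; the proofs are below) =====
def Claim_equal_piggy_points : Prop := ∀ (score : Int), Dom_piggy_points score → Spec_piggy_points score (piggy_points score)

-- ===== LEMMAS AND PROOFS =====

-- reference function: the minimum decimal digit of n, as an Int
def minDig (n : Nat) : Int :=
  if n < 10 then (n : Int) else min ((n % 10 : Nat) : Int) (minDig (n / 10))

-- reference decimal-character list (most significant first)
def digChars (n : Nat) : List Char :=
  if n < 10 then [Nat.digitChar n] else digChars (n / 10) ++ [Nat.digitChar (n % 10)]

theorem toDigitsCore_eq (fuel : Nat) : ∀ (n : Nat) (ds : List Char), n < 10 ^ (fuel + 1) →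
    Nat.toDigitsCore 10 (fuel + 1) n ds = digChars n ++ ds := by
  induction fuel with
  | zero =>
    intro n ds h
    have h' : n < 10 := by simpa using h
    have h0 : n / 10 = 0 := Nat.div_eq_of_lt h'
    simp [Nat.toDigitsCore, h0, digChars, h', Nat.mod_eq_of_lt h']
  | succ fuel ih =>
    intro n ds h
    by_cases hn : n < 10
    · have h0 : n / 10 = 0 := Nat.div_eq_of_lt hn
      simp [Nat.toDigitsCore, h0, digChars, hn, Nat.mod_eq_of_lt hn]
    · have h0 : ¬ n / 10 = 0 := by omega
      have hlt : n / 10 < 10 ^ (fuel + 1) := by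
        have hp : 10 ^ (fuel + 1 + 1) = 10 ^ (fuel + 1) * 10 := by ring
        omega
      rw [show Nat.toDigitsCore 10 (fuel + 1 + 1) n ds
            = Nat.toDigitsCore 10 (fuel + 1) (n / 10) (Nat.digitChar (n % 10) :: ds) by
          simp [Nat.toDigitsCore, h0]]
      rw [ih (n / 10) _ hlt]
      conv_rhs => rw [digChars]
      simp only [if_neg hn, List.append_assoc, List.cons_append, List.nil_append]

theorem toDigits_eq (n : Nat) : Nat.toDigits 10 n = digChars n := by
  have h : n < 10 ^ (n + 1) := by
    calc n < 10 ^ n := Nat.lt_pow_self (by norm_num)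
    _ ≤ 10 ^ (n + 1) := Nat.pow_le_pow_right (by norm_num) (by omega)
  have := toDigitsCore_eq n n [] h
  simpa [Nat.toDigits] using this

theorem minDig_le_nine (n : Nat) : minDig n ≤ 9 := by
  induction n using Nat.strong_induction_on with
  | _ n ih =>
    rw [minDig]
    split
    · omega
    · have : ((n % 10 : Nat) : Int) ≤ 9 := by omega
      exact le_trans (min_le_left _ _) this

theorem minDig_nonneg (n : Nat) : 0 ≤ minDig n := by
  induction n using Nat.strong_induction_on with
  | _ n ih =>
    rw [minDig]
    split
    · omega
    · exact le_min (by omega) (ih (n / 10) (by omega))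

theorem digitChar_inj : ∀ d < 10, ∀ e < 10, Nat.digitChar d = Nat.digitChar e → d = e := by decide

-- every digit character occurring in digChars n is at least the minimum digit
theorem minDig_le_of_mem (n : Nat) : ∀ d : Nat, d < 10 →
    Nat.digitChar d ∈ digChars n → minDig n ≤ (d : Int) := by
  induction n using Nat.strong_induction_on with
  | _ n ih =>
    intro d hd hmem
    rw [digChars] at hmem
    rw [minDig]
    by_cases hn : n < 10
    · simp only [if_pos hn, List.mem_singleton] at hmem
      have := digitChar_inj d hd n hn hmem
      simp only [if_pos hn]
      omega
    · simp only [if_neg hn, List.mem_append, List.mem_singleton] at hmem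
      simp only [if_neg hn]
      rcases hmem with h | h
      · exact le_trans (min_le_right _ _) (ih (n / 10) (by omega) d hd h)
      · have := digitChar_inj d hd (n % 10) (by omega) h
        exact le_trans (min_le_left _ _) (by omega)

-- the minimum digit's character occurs in digChars n
theorem digitChar_minDig_mem (n : Nat) : Nat.digitChar (minDig n).toNat ∈ digChars n := by
  induction n using Nat.strong_induction_on with
  | _ n ih =>
    rw [digChars, minDig]
    by_cases hn : n < 10
    · simp only [if_pos hn, List.mem_singleton]
      congr 1
    · simp only [if_neg hn, List.mem_append, List.mem_singleton]
      by_cases hc : ((n % 10 : Nat) : Int) ≤ minDig (n / 10)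
      · right
        rw [min_eq_left hc]
        congr 1
      · left
        rw [min_eq_right (by omega)]
        exact ih (n / 10) (by omega)

theorem contains_digChars (n : Nat) (c : Char) :
    PySem.Set.contains (PySem.Set.ofList (digChars n)) c = true ↔ c ∈ digChars n := by
  rw [PySem.Set.contains_iff, PySem.Set.mem_ofList]

theorem findDigit_eq (n : Nat) :
    findDigit "0123456789".toList (PySem.Set.ofList (digChars n)) = some (minDig n + 3) := by
  have hlist : "0123456789".toList =
      [Nat.digitChar 0, Nat.digitChar 1, Nat.digitChar 2, Nat.digitChar 3, Nat.digitChar 4,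
       Nat.digitChar 5, Nat.digitChar 6, Nat.digitChar 7, Nat.digitChar 8, Nat.digitChar 9] := by
    decide
  have h0 := minDig_nonneg n
  have h9 := minDig_le_nine n
  have htrue : ∀ d : Nat, d < 10 → (d : Int) = minDig n →
      PySem.Set.contains (PySem.Set.ofList (digChars n)) (Nat.digitChar d) = true := by
    intro d _ hdm
    rw [contains_digChars]
    have : (minDig n).toNat = d := by omega
    simpa [this] using digitChar_minDig_mem n
  have hfalse : ∀ d : Nat, d < 10 → (d : Int) < minDig n →
      PySem.Set.contains (PySem.Set.ofList (digChars n)) (Nat.digitChar d) = false := by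
    intro d hd hdm
    by_contra h
    have hmem : Nat.digitChar d ∈ digChars n := by
      rw [← contains_digChars n]
      revert h
      cases PySem.Set.contains (PySem.Set.ofList (digChars n)) (Nat.digitChar d) <;> simp
    have := minDig_le_of_mem n d hd hmem
    omega
  rw [hlist]
  have hcase : minDig n = 0 ∨ minDig n = 1 ∨ minDig n = 2 ∨ minDig n = 3 ∨ minDig n = 4 ∨
      minDig n = 5 ∨ minDig n = 6 ∨ minDig n = 7 ∨ minDig n = 8 ∨ minDig n = 9 := by omega
  rcases hcase with h | h | h | h | h | h | h | h | h | h
  · have ht := htrue 0 (by norm_num) (by omega)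
    simp only [findDigit, ht, reduceIte]
    rw [h]
    decide
  · have ht := htrue 1 (by norm_num) (by omega)
    have hf0 := hfalse 0 (by norm_num) (by omega)
    simp only [findDigit, hf0, ht, Bool.false_eq_true, reduceIte]
    rw [h]
    decide
  · have ht := htrue 2 (by norm_num) (by omega)
    have hf0 := hfalse 0 (by norm_num) (by omega)
    have hf1 := hfalse 1 (by norm_num) (by omega)
    simp only [findDigit, hf0, hf1, ht, Bool.false_eq_true, reduceIte]
    rw [h]
    decide
  · have ht := htrue 3 (by norm_num) (by omega)
    have hf0 := hfalse 0 (by norm_num) (by omega)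
    have hf1 := hfalse 1 (by norm_num) (by omega)
    have hf2 := hfalse 2 (by norm_num) (by omega)
    simp only [findDigit, hf0, hf1, hf2, ht, Bool.false_eq_true, reduceIte]
    rw [h]
    decide
  · have ht := htrue 4 (by norm_num) (by omega)
    have hf0 := hfalse 0 (by norm_num) (by omega)
    have hf1 := hfalse 1 (by norm_num) (by omega)
    have hf2 := hfalse 2 (by norm_num) (by omega)
    have hf3 := hfalse 3 (by norm_num) (by omega)
    simp only [findDigit, hf0, hf1, hf2, hf3, ht, Bool.false_eq_true, reduceIte]
    rw [h]
    decide
  · have ht := htrue 5 (by norm_num) (by omega)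
    have hf0 := hfalse 0 (by norm_num) (by omega)
    have hf1 := hfalse 1 (by norm_num) (by omega)
    have hf2 := hfalse 2 (by norm_num) (by omega)
    have hf3 := hfalse 3 (by norm_num) (by omega)
    have hf4 := hfalse 4 (by norm_num) (by omega)
    simp only [findDigit, hf0, hf1, hf2, hf3, hf4, ht, Bool.false_eq_true, reduceIte]
    rw [h]
    decide
  · have ht := htrue 6 (by norm_num) (by omega)
    have hf0 := hfalse 0 (by norm_num) (by omega)
    have hf1 := hfalse 1 (by norm_num) (by omega)
    have hf2 := hfalse 2 (by norm_num) (by omega)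
    have hf3 := hfalse 3 (by norm_num) (by omega)
    have hf4 := hfalse 4 (by norm_num) (by omega)
    have hf5 := hfalse 5 (by norm_num) (by omega)
    simp only [findDigit, hf0, hf1, hf2, hf3, hf4, hf5, ht, Bool.false_eq_true, reduceIte]
    rw [h]
    decide
  · have ht := htrue 7 (by norm_num) (by omega)
    have hf0 := hfalse 0 (by norm_num) (by omega)
    have hf1 := hfalse 1 (by norm_num) (by omega)
    have hf2 := hfalse 2 (by norm_num) (by omega)
    have hf3 := hfalse 3 (by norm_num) (by omega)
    have hf4 := hfalse 4 (by norm_num) (by omega)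
    have hf5 := hfalse 5 (by norm_num) (by omega)
    have hf6 := hfalse 6 (by norm_num) (by omega)
    simp only [findDigit, hf0, hf1, hf2, hf3, hf4, hf5, hf6, ht, Bool.false_eq_true, reduceIte]
    rw [h]
    decide
  · have ht := htrue 8 (by norm_num) (by omega)
    have hf0 := hfalse 0 (by norm_num) (by omega)
    have hf1 := hfalse 1 (by norm_num) (by omega)
    have hf2 := hfalse 2 (by norm_num) (by omega)
    have hf3 := hfalse 3 (by norm_num) (by omega)
    have hf4 := hfalse 4 (by norm_num) (by omega)
    have hf5 := hfalse 5 (by norm_num) (by omega)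
    have hf6 := hfalse 6 (by norm_num) (by omega)
    have hf7 := hfalse 7 (by norm_num) (by omega)
    simp only [findDigit, hf0, hf1, hf2, hf3, hf4, hf5, hf6, hf7, ht, Bool.false_eq_true, reduceIte]
    rw [h]
    decide
  · have ht := htrue 9 (by norm_num) (by omega)
    have hf0 := hfalse 0 (by norm_num) (by omega)
    have hf1 := hfalse 1 (by norm_num) (by omega)
    have hf2 := hfalse 2 (by norm_num) (by omega)
    have hf3 := hfalse 3 (by norm_num) (by omega)
    have hf4 := hfalse 4 (by norm_num) (by omega)
    have hf5 := hfalse 5 (by norm_num) (by omega)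
    have hf6 := hfalse 6 (by norm_num) (by omega)
    have hf7 := hfalse 7 (by norm_num) (by omega)
    have hf8 := hfalse 8 (by norm_num) (by omega)
    simp only [findDigit, hf0, hf1, hf2, hf3, hf4, hf5, hf6, hf7, hf8, ht, Bool.false_eq_true, reduceIte]
    rw [h]
    decide

-- A's loop computes min acc (minDig m) followed by the final min
theorem pigLoop_eq_aux (k : Nat) : ∀ (m : Int), 0 ≤ m → m.toNat ≤ k → ∀ acc : Int,
    min (pigLoop m acc).2 (pigLoop m acc).1 = min acc (minDig m.toNat) := by
  induction k with
  | zero =>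
    intro m hm hk acc
    rw [pigLoop]
    have h9 : ¬ 9 < m := by omega
    simp only [if_neg h9]
    have : minDig m.toNat = m := by
      rw [minDig]; simp only [if_pos (by omega : m.toNat < 10)]; omega
    rw [this]
  | succ k ih =>
    intro m hm hk acc
    rw [pigLoop]
    by_cases h9 : 9 < m
    · simp only [if_pos h9]
      have hd : PySem.Int.floordiv m 10 = m / 10 := PySem.Int.floordiv_eq_ediv_of_pos (by omega)
      have hmo : PySem.Int.mod m 10 = m % 10 := PySem.Int.mod_eq_emod_of_pos (by omega)
      rw [hd, hmo]
      rw [ih (m / 10) (by omega) (by omega)]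
      have hnat : (m / 10).toNat = m.toNat / 10 := by omega
      have h2 : minDig m.toNat = min ((m.toNat % 10 : Nat) : Int) (minDig (m.toNat / 10)) := by
        rw [minDig]; simp only [if_neg (by omega : ¬ m.toNat < 10)]
      rw [hnat, h2]
      have hcast : (m % 10 : Int) = ((m.toNat % 10 : Nat) : Int) := by omega
      rw [hcast, min_assoc]
    · simp only [if_neg h9]
      have : minDig m.toNat = m := by
        rw [minDig]; simp only [if_pos (by omega : m.toNat < 10)]; omega
      rw [this]

theorem piggy_eq (score : Int) : piggy_points score = piggy_points_alt score := by
  unfold piggy_points piggy_points_alt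
  have hsq : (0 : Int) ≤ score ^ 2 := sq_nonneg score
  have hA := pigLoop_eq_aux (score ^ 2).toNat (score ^ 2) hsq (le_refl _) 9
  simp only
  rw [hA, min_eq_right (minDig_le_nine _)]
  have htc : PySem.Int.toChars (score ^ 2) = digChars (score ^ 2).toNat := by
    rw [PySem.Int.toChars]
    simp only [if_neg (by omega : ¬ score ^ 2 < 0)]
    exact toDigits_eq _
  rw [htc, findDigit_eq]

-- ===== VERDICT (by name: the statement is the Claim_ definition above) =====
theorem piggy_points_spec : Claim_equal_piggy_points := by
  intro score _
  unfold Spec_piggy_points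
  exact piggy_eq score
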